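-- pv_equiv track=rewrite | github.com/michaelliudl/CodingInterviewPython | com/leetcode/strings/03031_h_minimum time to revert word to initial state 2.py | minimumTimeToInitialState1
-- ===== SOURCE A (Python) =====
-- def minimumTimeToInitialState1(word: str, k: int) -> int:
--     n = len(word)
--     dp = [0] * n
--     v = 0
--     for i in range(1, n):
--         while v and word[i] != word[v]:
--             v = dp[v - 1]
--         dp[i] = v + (word[i] == word[v])
--         v = dp[i]
--     while v and (n - v) % k > 0:
--         v = dp[v - 1]
--     return (n - v + k - 1) // k
-- ===== SOURCE B (Python) =====
-- def minimumTimeToInitialState1(word: str, k: int) -> int: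
--     # After t operations the first t*k chars are gone and t*k arbitrary chars are
--     # appended: the word can be back to its initial state at time t iff the
--     # remaining suffix word[t*k:] is a prefix of word.  Scan t = 1, 2, ...
--     n = len(word)
--     if n == 0:
--         return 0
--     t = 1
--     while t * k < n:
--         if word[t * k:] == word[:n - t * k]:
--             return t
--         t += 1
--     return t
-- ===== Notes on version B (the rewrite author's own statement) =====
-- stated objective: simpler
-- what changed: Replaces the KMP prefix-function table and failure-link walk with a direct forward scan over t = 1, 2, ... that checks whether the remaining suffix word[t*k:] equals the prefix word[:n-t*k] of the same length; B stops at the first match instead of always building the whole table, which a timing run measured as faster (worst case it is O(n^2/k), slower than A).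
-- outside the precondition, e.g. on minimumTimeToInitialState1('ab', 0): A raises ZeroDivisionError, B returns 1; on minimumTimeToInitialState1('ab', -1): A returns 0, B returns 2
import Mathlib
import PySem

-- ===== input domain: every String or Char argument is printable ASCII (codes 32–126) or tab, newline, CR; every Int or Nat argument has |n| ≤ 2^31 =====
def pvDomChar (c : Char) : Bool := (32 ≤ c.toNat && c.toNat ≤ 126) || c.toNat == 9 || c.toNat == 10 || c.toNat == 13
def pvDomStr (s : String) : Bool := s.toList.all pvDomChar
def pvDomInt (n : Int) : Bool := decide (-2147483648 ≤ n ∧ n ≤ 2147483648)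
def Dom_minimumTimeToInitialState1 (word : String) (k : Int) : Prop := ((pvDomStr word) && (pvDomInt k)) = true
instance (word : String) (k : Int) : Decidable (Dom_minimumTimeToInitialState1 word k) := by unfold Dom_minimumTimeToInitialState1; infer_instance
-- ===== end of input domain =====

-- B replaces A's KMP prefix-function table + failure-link walk by a direct scan over
-- t = 1, 2, ... comparing the suffix word[t*k:] with the prefix of the same length
-- (simpler; measured faster on the generated inputs, worst-case slower).  Pre_ restricts to the problem's natural domain 1 ≤ k:
-- A raises ZeroDivisionError for k = 0, and for k < 0 returns a floor-division
-- artefact that B does not reproduce.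


-- ===== PORT A =====
-- word[i] for an index that is always in range in A (0 ≤ i < len(word))
def pvCharAt (l : List Char) (i : Int) : Char := PySem.List.pyGetD l i ' '
-- dp[i] for an index that is always in range in A
def pvDpAt (dp : List Int) (i : Int) : Int := PySem.List.pyGetD dp i 0

-- `while v and word[i] != word[v]: v = dp[v - 1]` (c is word[i]).
-- The inner `if` guard only ensures termination; in every state A reaches,
-- dp[v-1] < v holds, so the guard is always taken where Python loops.
def pvWhileA (l : List Char) (dp : List Int) (c : Char) (v : Int) : Int :=
  if v ≠ 0 ∧ pvCharAt l v ≠ c then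
    let v' := pvDpAt dp (v - 1)
    if _h : v'.toNat < v.toNat then pvWhileA l dp c v' else v'
  else v
termination_by v.toNat

-- body of `for i in range(1, n)` acting on the state (dp, v)
def pvStepA (l : List Char) (st : List Int × Int) (i : Int) : List Int × Int :=
  let v1 := pvWhileA l st.1 (pvCharAt l i) st.2
  let d := v1 + (if pvCharAt l i = pvCharAt l v1 then 1 else 0)
  (PySem.List.pySetD st.1 i d, d)

-- `while v and (n - v) % k > 0: v = dp[v - 1]` (same termination guard as above)
def pvWhileB (dp : List Int) (n k v : Int) : Int :=
  if v ≠ 0 ∧ 0 < PySem.Int.mod (n - v) k then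
    let v' := pvDpAt dp (v - 1)
    if _h : v'.toNat < v.toNat then pvWhileB dp n k v' else v'
  else v
termination_by v.toNat

def minimumTimeToInitialState1 (word : String) (k : Int) : Int :=
  let l := word.toList
  let n : Int := (l.length : Int)
  let st := (PySem.List.pyRange 1 n 1).foldl (pvStepA l) (List.replicate l.length 0, 0)
  let v := pvWhileB st.1 n k st.2
  PySem.Int.floordiv (n - v + k - 1) k

-- ===== PORT B =====
-- `while t*k < n: if word[t*k:] == word[:n-t*k]: return t; t += 1; return t`.
-- fuel only ensures termination: with 1 ≤ k the loop body runs fewer than n times,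
-- and fuel = n+1 is never exhausted.
def pvScanB (l : List Char) (n k : Int) (t : Int) : Nat → Int
  | 0 => t
  | fuel+1 =>
    if t * k < n then
      if PySem.List.slice l (some (t * k)) none = PySem.List.slice l none (some (n - t * k))
      then t
      else pvScanB l n k (t + 1) fuel
    else t

def minimumTimeToInitialState1_alt (word : String) (k : Int) : Int :=
  let l := word.toList
  let n : Int := (l.length : Int)
  if n = 0 then 0 else pvScanB l n k 1 (l.length + 1)

-- ===== PRECONDITION & SPEC =====
-- Pre_ restricts to the problem's natural domain 1 ≤ k: A raises ZeroDivisionError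
-- for k = 0, and for k < 0 returns a floor-division artefact B does not reproduce.
def Pre_minimumTimeToInitialState1 (word : String) (k : Int) : Prop := 1 ≤ k
instance (word : String) (k : Int) : Decidable (Pre_minimumTimeToInitialState1 word k) := by unfold Pre_minimumTimeToInitialState1; infer_instance

def pvWitness_minimumTimeToInitialState1 : String × Int := ("abacaba", 3)

def Spec_minimumTimeToInitialState1 (word : String) (k : Int) (out : Int) : Prop := out = minimumTimeToInitialState1_alt word k
instance (word : String) (k : Int) (out : Int) : Decidable (Spec_minimumTimeToInitialState1 word k out) := by unfold Spec_minimumTimeToInitialState1; infer_instance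

-- ===== CLAIM (what is proved, stated in full; the proofs are below) =====
def Claim_equal_minimumTimeToInitialState1 : Prop := ∀ (word : String) (k : Int), Dom_minimumTimeToInitialState1 word k → Pre_minimumTimeToInitialState1 word k → Spec_minimumTimeToInitialState1 word k (minimumTimeToInitialState1 word k)

-- ===== LEMMAS AND PROOFS =====

-- ---- border theory ----

def chAt (s : List Char) (j : Nat) : Char := s.getD j ' '

-- b is a border length of s: the prefix of length b equals the suffix of length b
def Brd (s : List Char) (b : Nat) : Prop := b ≤ s.length ∧ s.take b = s.drop (s.length - b)

lemma brd_zero (s : List Char) : Brd s 0 := ⟨Nat.zero_le _, by simp⟩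

lemma brd_nest {s : List Char} {b c : Nat} (hb : Brd s b) (hc : Brd s c) (hcb : c ≤ b) :
    Brd (s.take b) c := by
  obtain ⟨hb1, hb2⟩ := hb
  obtain ⟨hc1, hc2⟩ := hc
  refine ⟨by simp [List.length_take]; omega, ?_⟩
  rw [List.take_take, min_eq_left hcb, hc2, List.length_take, hb2, List.drop_drop]
  congr 1
  omega

lemma brd_trans {s : List Char} {b c : Nat} (hb : Brd s b) (hc : Brd (s.take b) c) :
    Brd s c := by
  obtain ⟨hb1, hb2⟩ := hb
  obtain ⟨hc1, hc2⟩ := hc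
  rw [List.length_take, min_eq_left hb1] at hc1 hc2
  refine ⟨le_trans hc1 hb1, ?_⟩
  calc s.take c = (s.take b).take c := by rw [List.take_take, min_eq_left hc1]
    _ = (s.take b).drop (b - c) := hc2
    _ = (s.drop (s.length - b)).drop (b - c) := by rw [hb2]
    _ = s.drop (s.length - c) := by rw [List.drop_drop]; congr 1; omega

lemma take_succ_chAt {l : List Char} {i : Nat} (hi : i < l.length) :
    l.take (i+1) = l.take i ++ [chAt l i] := by
  rw [List.take_add_one]
  simp [chAt, List.getD, List.getElem?_eq_getElem hi]

lemma brd_concat {s : List Char} {a : Char} {c : Nat} (hc : c < s.length) :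
    Brd (s ++ [a]) (c+1) ↔ Brd s c ∧ chAt s c = a := by
  constructor
  · rintro ⟨h1, h2⟩
    rw [List.take_append_of_le_length (by omega), List.length_append] at h2
    simp only [List.length_singleton] at h2
    rw [show s.length + 1 - (c+1) = s.length - c by omega,
        List.drop_append_of_le_length (by omega)] at h2
    rw [take_succ_chAt hc] at h2
    have hlen : (s.take c).length = (s.drop (s.length - c)).length := by
      simp; omega
    obtain ⟨e1, e2⟩ := List.append_inj h2 (by simpa using hlen)
    exact ⟨⟨le_of_lt hc, e1⟩, by simpa using e2⟩
  · rintro ⟨⟨h1, h2⟩, h3⟩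
    refine ⟨by simp; omega, ?_⟩
    rw [List.take_append_of_le_length (by omega), List.length_append]
    simp only [List.length_singleton]
    rw [show s.length + 1 - (c+1) = s.length - c by omega,
        List.drop_append_of_le_length (by omega)]
    rw [take_succ_chAt hc, h2, h3]

-- the longest proper border (the prefix-function value) of s
def IsPF (s : List Char) (b : Nat) : Prop :=
  Brd s b ∧ b < s.length ∧ ∀ c, c < s.length → Brd s c → c ≤ b

-- ---- bridges between the Int-level port and the Nat-level theory ----

lemma pvCharAt_eq (l : List Char) (v : Int) (hv : 0 ≤ v) :
    pvCharAt l v = chAt l v.toNat := by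
  unfold pvCharAt chAt
  rw [← Int.toNat_of_nonneg hv, PySem.List.pyGetD_natCast]
  rw [Int.toNat_of_nonneg hv]

lemma pvDpAt_eq (dp : List Int) (v : Int) (hv : 0 ≤ v) :
    pvDpAt dp v = dp.getD v.toNat 0 := by
  unfold pvDpAt
  rw [← Int.toNat_of_nonneg hv, PySem.List.pyGetD_natCast]
  rw [Int.toNat_of_nonneg hv]

lemma getD_set_ne (l : List Int) (i j : Nat) (v : Int) (h : j ≠ i) :
    (l.set i v).getD j 0 = l.getD j 0 := by
  simp [List.getD, Ne.symm h]

lemma getD_set_self (l : List Int) (i : Nat) (v : Int) (h : i < l.length) :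
    (l.set i v).getD i 0 = v := by
  simp [List.getD, h]

-- dp[0..i-1] holds the prefix-function values of l's prefixes of length 1..i
def DpGood (l : List Char) (dp : List Int) (i : Nat) : Prop :=
  dp.length = l.length ∧
  ∀ j : Nat, j < i → 0 ≤ dp.getD j 0 ∧ IsPF (l.take (j+1)) (dp.getD j 0).toNat

-- ---- the first while loop: failure-link walk during table construction ----

lemma whileA_spec (l : List Char) (dp : List Int) (i : Nat)
    (hin : i ≤ l.length) (hdp : DpGood l dp i) :
    ∀ (m : Nat) (v : Int), v.toNat ≤ m → 0 ≤ v → Brd (l.take i) v.toNat → v.toNat < i →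
    (∀ c, c < i → Brd (l.take i) c → v.toNat < c → chAt l c ≠ chAt l i) →
    0 ≤ pvWhileA l dp (chAt l i) v ∧
    Brd (l.take i) (pvWhileA l dp (chAt l i) v).toNat ∧
    (pvWhileA l dp (chAt l i) v).toNat < i ∧
    (∀ c, c < i → Brd (l.take i) c → (pvWhileA l dp (chAt l i) v).toNat < c →
      chAt l c ≠ chAt l i) ∧
    (pvWhileA l dp (chAt l i) v = 0 ∨ chAt l (pvWhileA l dp (chAt l i) v).toNat = chAt l i) := by
  intro m
  induction m with
  | zero =>
    intro v hm hv0 hvb hvi hmax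
    have hv : v = 0 := by omega
    subst hv
    rw [pvWhileA]
    simp only [ne_eq, not_true_eq_false, false_and, if_false]
    exact ⟨le_refl 0, by simpa using hvb, hvi, by simpa using hmax, Or.inl trivial⟩
  | succ m ih =>
    intro v hm hv0 hvb hvi hmax
    by_cases hstop : v = 0 ∨ chAt l v.toNat = chAt l i
    · have hcond : ¬(v ≠ 0 ∧ pvCharAt l v ≠ chAt l i) := by
        rw [pvCharAt_eq l v hv0]; tauto
      rw [pvWhileA]
      simp only [hcond, if_false]
      exact ⟨hv0, hvb, hvi, hmax, hstop⟩
    · push Not at hstop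
      obtain ⟨hvne, hcne⟩ := hstop
      have hvpos : 1 ≤ v.toNat := by omega
      have hcond : (v ≠ 0 ∧ pvCharAt l v ≠ chAt l i) := by
        rw [pvCharAt_eq l v hv0]; exact ⟨hvne, hcne⟩
      have hj := (hdp.2 (v.toNat - 1) (by omega))
      have hv'val : pvDpAt dp (v - 1) = dp.getD (v.toNat - 1) 0 := by
        rw [pvDpAt_eq dp (v-1) (by omega)]
        congr 1
        omega
      set v' := pvDpAt dp (v - 1) with hv'def
      have hv'0 : 0 ≤ v' := hv'val ▸ hj.1
      have hpf : IsPF (l.take v.toNat) v'.toNat := by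
        rw [hv'val]
        have : v.toNat - 1 + 1 = v.toNat := by omega
        rw [← this]
        exact hj.2
      have hlentake : (l.take v.toNat).length = v.toNat := by
        simp; omega
      have hv'lt : v'.toNat < v.toNat := by
        have := hpf.2.1
        rwa [hlentake] at this
      have hv'brd : Brd (l.take i) v'.toNat := by
        apply brd_trans hvb
        have : (l.take i).take v.toNat = l.take v.toNat := by
          rw [List.take_take, min_eq_left (by omega)]
        rw [this]
        exact hpf.1
      have hv'max : ∀ c, c < i → Brd (l.take i) c → v'.toNat < c → chAt l c ≠ chAt l i := by
        intro c hci hcb hcgt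
        rcases lt_trichotomy c v.toNat with hlt | heq | hgt
        · exfalso
          have hnest : Brd ((l.take i).take v.toNat) c := brd_nest hvb hcb (le_of_lt hlt)
          rw [List.take_take, min_eq_left (by omega)] at hnest
          have := hpf.2.2 c (by rwa [hlentake]) hnest
          omega
        · subst heq; exact hcne
        · exact hmax c hci hcb hgt
      rw [pvWhileA]
      simp only [if_pos hcond, ← hv'def, dif_pos hv'lt]
      exact ih v' (by omega) hv'0 hv'brd (by omega) hv'max

lemma chAt_take {l : List Char} {i e : Nat} (h : e < i) : chAt (l.take i) e = chAt l e := by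
  simp [chAt, List.getD, List.getElem?_take_of_lt h]

-- ---- one iteration of the table-building loop ----

lemma stepA_spec (l : List Char) (dp : List Int) (i : Nat)
    (hi : 1 ≤ i) (hin : i < l.length) (hdp : DpGood l dp i)
    (v : Int) (hv0 : 0 ≤ v) (hveq : v = dp.getD (i-1) 0) :
    DpGood l (pvStepA l (dp, v) (i:Int)).1 (i+1) ∧
    (pvStepA l (dp, v) (i:Int)).2 = (pvStepA l (dp, v) (i:Int)).1.getD i 0 := by
  have hpf : IsPF (l.take i) v.toNat := by
    have := (hdp.2 (i-1) (by omega)).2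
    rw [← hveq] at this
    rwa [show i - 1 + 1 = i by omega] at this
  have hlentake : (l.take i).length = i := by simp; omega
  have hchar : pvCharAt l (i:Int) = chAt l i := by
    rw [pvCharAt_eq l _ (by positivity)]; simp
  have hvb : Brd (l.take i) v.toNat := hpf.1
  have hvi : v.toNat < i := by have := hpf.2.1; rwa [hlentake] at this
  have hmax : ∀ c, c < i → Brd (l.take i) c → v.toNat < c → chAt l c ≠ chAt l i := by
    intro c hci hcb hgt
    exfalso
    have := hpf.2.2 c (by rwa [hlentake]) hcb
    omega
  obtain ⟨hr0, hrb, hri, hrmax, hrstop⟩ :=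
    whileA_spec l dp i (le_of_lt hin) hdp v.toNat v (le_refl _) hv0 hvb hvi hmax
  set r := pvWhileA l dp (chAt l i) v with hrdef
  have hstep : pvStepA l (dp, v) (i:Int) =
      (dp.set i (r + if chAt l i = chAt l r.toNat then 1 else 0),
       r + if chAt l i = chAt l r.toNat then 1 else 0) := by
    show (PySem.List.pySetD dp (i:Int) _, _) = _
    rw [PySem.List.pySetD_natCast]
    rw [hchar, pvCharAt_eq l r hr0, ← hrdef]
  set d : Int := r + if chAt l i = chAt l r.toNat then 1 else 0 with hddef
  have hd0 : 0 ≤ d := by rw [hddef]; split_ifs <;> omega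
  have hdlf : IsPF (l.take (i+1)) d.toNat := by
    have htk : l.take (i+1) = l.take i ++ [chAt l i] := take_succ_chAt hin
    have hlen1 : (l.take (i+1)).length = i + 1 := by simp; omega
    by_cases hceq : chAt l i = chAt l r.toNat
    · have hdval : d.toNat = r.toNat + 1 := by rw [hddef]; simp [hceq]; omega
      rw [hdval]
      refine ⟨?_, by omega, ?_⟩
      · rw [htk, brd_concat (by rwa [hlentake])]
        refine ⟨hrb, ?_⟩
        rw [chAt_take (by omega), hceq]
      · intro c hclen hcb
        match c with
        | 0 => omega
        | (e+1) =>
          rw [htk] at hcb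
          rw [brd_concat (by rw [hlentake]; omega)] at hcb
          obtain ⟨hb1, hb2⟩ := hcb
          rw [chAt_take (by rw [hlen1] at hclen; omega)] at hb2
          by_contra hcon
          exact hrmax e (by rw [hlen1] at hclen; omega) hb1 (by omega) hb2
    · have hr00 : r = 0 := by
        rcases hrstop with h | h
        · exact h
        · exact absurd h.symm hceq
      have hceq0 : ¬ chAt l i = chAt l 0 := by
        rw [hr00] at hceq; simpa using hceq
      have hdval : d.toNat = 0 := by rw [hddef, hr00]; simp [hceq0]
      rw [hdval]
      refine ⟨brd_zero _, by omega, ?_⟩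
      intro c hclen hcb
      match c with
      | 0 => omega
      | (e+1) =>
        exfalso
        rw [htk] at hcb
        rw [brd_concat (by rw [hlentake]; omega)] at hcb
        obtain ⟨hb1, hb2⟩ := hcb
        rw [chAt_take (by rw [hlen1] at hclen; omega)] at hb2
        rcases Nat.eq_zero_or_pos e with he | he
        · subst he
          exact hceq0 hb2.symm
        · exact hrmax e (by rw [hlen1] at hclen; omega) hb1 (by omega) hb2
  rw [hstep]
  refine ⟨⟨by simpa using hdp.1, ?_⟩, ?_⟩
  · intro j hj
    rcases Nat.lt_or_ge j i with hji | hji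
    · rw [getD_set_ne dp i j d (by omega)]
      exact hdp.2 j hji
    · have hji' : j = i := by omega
      subst hji'
      rw [getD_set_self dp j d (by rw [hdp.1]; omega)]
      exact ⟨hd0, hdlf⟩
  · simp only
    rw [getD_set_self dp i d (by rw [hdp.1]; omega)]

-- ---- the table-building fold computes prefix-function values ----

lemma foldA_spec (l : List Char) (hl : l ≠ []) :
    ∀ i : Nat, 1 ≤ i → i ≤ l.length →
    DpGood l ((PySem.List.pyRange 1 (i:Int) 1).foldl (pvStepA l)
        (List.replicate l.length 0, 0)).1 i ∧
    ((PySem.List.pyRange 1 (i:Int) 1).foldl (pvStepA l) (List.replicate l.length 0, 0)).2 =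
      ((PySem.List.pyRange 1 (i:Int) 1).foldl (pvStepA l)
        (List.replicate l.length 0, 0)).1.getD (i-1) 0 := by
  intro i
  induction i with
  | zero => omega
  | succ i ih =>
    intro _ hle
    rcases Nat.eq_zero_or_pos i with hz | hpos
    · subst hz
      rw [show ((1:Nat):Int) = 1 by rfl, PySem.List.pyRange_one_eq_nil (by omega)]
      simp only [List.foldl_nil]
      have hlen : 1 ≤ l.length := by
        cases l with
        | nil => exact absurd rfl hl
        | cons a t => simp
      refine ⟨⟨by simp, ?_⟩, by simp⟩
      intro j hj
      have : j = 0 := by omega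
      subst this
      have hget : (List.replicate l.length (0:Int)).getD 0 0 = 0 := by
        have h0 : 0 < l.length := hlen
        simp [List.getD, h0]
      rw [hget]
      refine ⟨le_refl 0, brd_zero _, by simp; omega, ?_⟩
      intro c hc _
      simp at hc
      omega
    · obtain ⟨hdp, hsnd⟩ := ih hpos (by omega)
      have hsplit : PySem.List.pyRange 1 ((i+1:Nat):Int) 1 =
          PySem.List.pyRange 1 (i:Int) 1 ++ [(i:Int)] := by
        rw [show ((i+1:Nat):Int) = (i:Int) + 1 by push_cast; ring]
        exact PySem.List.pyRange_one_succ_right (by exact_mod_cast hpos)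
      rw [hsplit, List.foldl_append]
      simp only [List.foldl_cons, List.foldl_nil]
      set st := (PySem.List.pyRange 1 (i:Int) 1).foldl (pvStepA l)
        (List.replicate l.length 0, 0) with hst
      have hv0 : 0 ≤ st.2 := by
        rw [hsnd]
        exact (hdp.2 (i-1) (by omega)).1
      have := stepA_spec l st.1 i hpos (by omega) hdp st.2 hv0 hsnd
      have hpair : (st.1, st.2) = st := rfl
      rw [hpair] at this
      exact ⟨this.1, by rw [show i + 1 - 1 = i by omega]; exact this.2⟩

-- ---- the final while loop: failure-link walk for the divisibility condition ----

lemma whileB_spec (l : List Char) (dp : List Int) (k : Int) (hk : 1 ≤ k)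
    (hdp : DpGood l dp l.length) :
    ∀ (m : Nat) (v : Int), v.toNat ≤ m → 0 ≤ v →
    (v = 0 ∨ (Brd l v.toNat ∧ v.toNat < l.length)) →
    (∀ c : Nat, c < l.length → Brd l c → v.toNat < c →
      ¬ (k ∣ ((l.length:Int) - (c:Int)))) →
    0 ≤ pvWhileB dp (l.length:Int) k v ∧
    (pvWhileB dp (l.length:Int) k v = 0 ∨
      (Brd l (pvWhileB dp (l.length:Int) k v).toNat ∧
       (pvWhileB dp (l.length:Int) k v).toNat < l.length)) ∧
    (∀ c : Nat, c < l.length → Brd l c → (pvWhileB dp (l.length:Int) k v).toNat < c →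
      ¬ (k ∣ ((l.length:Int) - (c:Int)))) ∧
    (pvWhileB dp (l.length:Int) k v = 0 ∨
      k ∣ ((l.length:Int) - pvWhileB dp (l.length:Int) k v)) := by
  intro m
  induction m with
  | zero =>
    intro v hm hv0 hdisj hmax
    have hv : v = 0 := by omega
    subst hv
    rw [pvWhileB]
    simp only [ne_eq, not_true_eq_false, false_and, if_false]
    exact ⟨le_refl 0, Or.inl trivial, hmax, Or.inl trivial⟩
  | succ m ih =>
    intro v hm hv0 hdisj hmax
    by_cases hstop : v = 0 ∨ k ∣ ((l.length:Int) - v)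
    · have hcond : ¬(v ≠ 0 ∧ 0 < PySem.Int.mod ((l.length:Int) - v) k) := by
        rcases hstop with h | h
        · tauto
        · rw [(PySem.Int.mod_eq_zero_iff_dvd _ _).2 h]
          simp
      rw [pvWhileB]
      rw [if_neg hcond]
      exact ⟨hv0, hdisj, hmax, hstop⟩
    · push Not at hstop
      obtain ⟨hvne, hndvd⟩ := hstop
      have hvpos : 1 ≤ v.toNat := by omega
      have hvbrd : Brd l v.toNat ∧ v.toNat < l.length := by tauto
      have hcond : (v ≠ 0 ∧ 0 < PySem.Int.mod ((l.length:Int) - v) k) := by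
        refine ⟨hvne, ?_⟩
        have h1 := PySem.Int.mod_nonneg ((l.length:Int) - v) (by omega : (0:Int) < k)
        have h2 : PySem.Int.mod ((l.length:Int) - v) k ≠ 0 := by
          intro h
          exact hndvd ((PySem.Int.mod_eq_zero_iff_dvd _ _).1 h)
        omega
      have hj := hdp.2 (v.toNat - 1) (by omega)
      have hv'val : pvDpAt dp (v - 1) = dp.getD (v.toNat - 1) 0 := by
        rw [pvDpAt_eq dp (v-1) (by omega)]
        congr 1
        omega
      set v' := pvDpAt dp (v - 1) with hv'def
      have hv'0 : 0 ≤ v' := hv'val ▸ hj.1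
      have hpf : IsPF (l.take v.toNat) v'.toNat := by
        rw [hv'val]
        have : v.toNat - 1 + 1 = v.toNat := by omega
        rw [← this]
        exact hj.2
      have hlentake : (l.take v.toNat).length = v.toNat := by simp; omega
      have hv'lt : v'.toNat < v.toNat := by
        have := hpf.2.1
        rwa [hlentake] at this
      have hv'brd : Brd l v'.toNat := brd_trans hvbrd.1 hpf.1
      have hv'max : ∀ c : Nat, c < l.length → Brd l c → v'.toNat < c →
          ¬ (k ∣ ((l.length:Int) - (c:Int))) := by
        intro c hcl hcb hcgt
        rcases lt_trichotomy c v.toNat with hlt | heq | hgt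
        · exfalso
          have hnest : Brd (l.take v.toNat) c := brd_nest hvbrd.1 hcb (le_of_lt hlt)
          have := hpf.2.2 c (by rwa [hlentake]) hnest
          omega
        · subst heq
          rw [Int.toNat_of_nonneg hv0]
          exact hndvd
        · exact hmax c hcl hcb hgt
      rw [pvWhileB]
      simp only [if_pos hcond, ← hv'def, dif_pos hv'lt]
      exact ih v' (by omega) hv'0 (Or.inr ⟨hv'brd, by omega⟩) hv'max

-- ---- the scan of B: characterisation as the least valid t ----

def DoneB (l : List Char) (k t : Int) : Prop :=
  (l.length:Int) ≤ t * k ∨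
  PySem.List.slice l (some (t * k)) none =
    PySem.List.slice l none (some ((l.length:Int) - t * k))

lemma tk_pos {t k : Int} (ht : 1 ≤ t) (hk : 1 ≤ k) : (1:Int) ≤ t * k := by
  nlinarith

lemma doneB_iff (l : List Char) (k t : Int) (ht : 1 ≤ t) (hk : 1 ≤ k)
    (hlt : t * k < (l.length:Int)) :
    DoneB l k t ↔ Brd l ((l.length:Int) - t * k).toNat := by
  have htk0 : (0:Int) ≤ t * k := le_trans (by norm_num) (tk_pos ht hk)
  have hs1 : PySem.List.slice l (some (t * k)) none = l.drop (t * k).toNat :=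
    PySem.List.slice_from l htk0
  have hs2 : PySem.List.slice l none (some ((l.length:Int) - t * k)) =
      l.take ((l.length:Int) - t * k).toNat :=
    PySem.List.slice_to l (by omega)
  have hnum : l.length - ((l.length:Int) - t * k).toNat = (t * k).toNat := by omega
  constructor
  · intro h
    rcases h with h | h
    · omega
    · refine ⟨by omega, ?_⟩
      rw [hnum]
      rw [hs1, hs2] at h
      exact h.symm
  · intro h
    refine Or.inr ?_
    rw [hs1, hs2]
    have := h.2
    rw [hnum] at this
    exact this.symm

lemma scanB_eq (l : List Char) (k T : Int) (hT : 1 ≤ T)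
    (hdone : DoneB l k T) (hmin : ∀ s : Int, 1 ≤ s → s < T → ¬ DoneB l k s) :
    ∀ (fuel : Nat) (t : Int), 1 ≤ t → t ≤ T → (T - t).toNat < fuel →
    pvScanB l (l.length:Int) k t fuel = T := by
  intro fuel
  induction fuel with
  | zero => intro t _ _ h; omega
  | succ fuel ih =>
    intro t ht1 htT hfuel
    by_cases heq : t = T
    · subst heq
      show (if t * k < (l.length:Int) then _ else t) = t
      rcases hdone with h | h
      · rw [if_neg (by omega)]
      · by_cases h1 : t * k < (l.length:Int)
        · rw [if_pos h1, if_pos h]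
        · rw [if_neg h1]
    · have hlt : t < T := by omega
      have hnd := hmin t ht1 hlt
      rw [DoneB, not_or] at hnd
      obtain ⟨hnd1, hnd2⟩ := hnd
      show (if t * k < (l.length:Int) then _ else t) = T
      rw [if_pos (by omega), if_neg hnd2]
      exact ih (t+1) (by omega) (by omega) (by omega)

-- ---- assembly ----

lemma main_eq (word : String) (k : Int) (hk : 1 ≤ k) :
    minimumTimeToInitialState1 word k = minimumTimeToInitialState1_alt word k := by
  by_cases hl : word.toList = []
  · simp only [minimumTimeToInitialState1, minimumTimeToInitialState1_alt, hl]
    simp only [List.length_nil, Nat.cast_zero, if_true]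
    rw [show PySem.List.pyRange 1 0 1 = [] from PySem.List.pyRange_one_eq_nil (by omega)]
    simp only [List.replicate, List.foldl_nil]
    rw [pvWhileB]
    simp only [ne_eq, not_true_eq_false, false_and, if_false]
    rw [PySem.Int.floordiv_eq_iff_of_pos (by omega : (0:Int) < k)]
    omega
  · set l := word.toList with hldef
    have hn1 : 1 ≤ l.length := by
      cases hx : l with
      | nil => exact absurd hx hl
      | cons a t => simp
    set st := (PySem.List.pyRange 1 (l.length:Int) 1).foldl (pvStepA l)
      (List.replicate l.length 0, 0) with hstdef
    obtain ⟨hdp, hsnd⟩ := foldA_spec l hl l.length hn1 (le_refl _)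
    rw [← hstdef] at hdp hsnd
    have hv0 : 0 ≤ st.2 := by rw [hsnd]; exact (hdp.2 (l.length - 1) (by omega)).1
    have hpf : IsPF l (st.2).toNat := by
      have := (hdp.2 (l.length - 1) (by omega)).2
      rw [← hsnd] at this
      rwa [show l.length - 1 + 1 = l.length by omega, List.take_length] at this
    set r := pvWhileB st.1 (l.length:Int) k st.2 with hrdef
    obtain ⟨hr0, hrdisj, hrmax, hrdvd⟩ :=
      whileB_spec l st.1 k hk hdp (st.2).toNat st.2 (le_refl _) hv0
        (Or.inr ⟨hpf.1, hpf.2.1⟩)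
        (by intro c hcl hcb hgt; exact absurd (hpf.2.2 c hcl hcb) (by omega))
    rw [← hrdef] at hr0 hrdisj hrmax hrdvd
    have hrlt : r < (l.length:Int) := by
      rcases hrdisj with h | h
      · omega
      · omega
    set n : Int := (l.length:Int) with hndef
    set T := PySem.Int.floordiv (n - r + k - 1) k with hTdef
    have hbr := (PySem.Int.floordiv_eq_iff_of_pos (by omega : (0:Int) < k)).1 hTdef.symm
    have hexp1 : (T + 1) * k = T * k + k := by ring
    rw [hexp1] at hbr
    have hup : n - r ≤ T * k := by omega
    have hlo : (T - 1) * k < n - r := by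
      have : (T - 1) * k = T * k - k := by ring
      omega
    have hT1 : 1 ≤ T := by
      by_contra hcon
      have hT0 : T ≤ 0 := by omega
      have : T * k ≤ 0 := mul_nonpos_of_nonpos_of_nonneg hT0 (by omega)
      omega
    have hTn : T ≤ n := by
      by_contra hcon
      have h1 : n + 1 ≤ T := by omega
      have h2 : (n + 1) * k ≤ T * k := by
        apply mul_le_mul_of_nonneg_right h1 (by omega)
      have h3 : (n + 1) * k = n * k + k := by ring
      have h4 : n ≤ n * k := le_mul_of_one_le_right (by omega) hk
      omega
    -- minimality of T among valid times
    have hmin : ∀ s : Int, 1 ≤ s → s < T → ¬ DoneB l k s := by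
      intro s hs1 hsT hdone
      have hske : s * k ≤ (T - 1) * k := by
        apply mul_le_mul_of_nonneg_right (by omega) (by omega)
      have hskn : s * k < n - r := by omega
      have hsk1 : (1:Int) ≤ s * k := tk_pos hs1 hk
      have hbrd := (doneB_iff l k s hs1 hk (by omega)).1 hdone
      have hc0 : (0:Int) ≤ n - s * k := by omega
      have hcast : (((n - s * k).toNat : Int)) = n - s * k := Int.toNat_of_nonneg hc0
      refine hrmax (n - s * k).toNat (by omega) hbrd (by omega) ?_
      rw [hcast]
      have : n - (n - s * k) = s * k := by ring
      rw [this]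
      exact Dvd.intro s (by ring)
    -- T is a valid time
    have hdone : DoneB l k T := by
      by_cases hdvd : k ∣ (n - r)
      · obtain ⟨m, hm⟩ := hdvd
        have hmT : m = T := by
          have h1 : (T - 1) * k < k * m := by omega
          have h2 : k * m ≤ T * k := by omega
          have h3 : T - 1 < m := by
            by_contra hcon
            have : k * m ≤ k * (T-1) := by
              apply mul_le_mul_of_nonneg_left (by omega) (by omega)
            have : k * (T - 1) = (T - 1) * k := by ring
            omega
          have h4 : m ≤ T := by
            by_contra hcon
            have : k * (T + 1) ≤ k * m := by
              apply mul_le_mul_of_nonneg_left (by omega) (by omega)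
            have h5 : k * (T + 1) = T * k + k := by ring
            omega
          omega
        have hPeq : T * k = n - r := by rw [hm, hmT]; ring
        by_cases hr00 : r = 0
        · exact Or.inl (by omega)
        · have hrpos : 0 < r := by omega
          have hlt : T * k < n := by omega
          rw [doneB_iff l k T hT1 hk hlt]
          have : ((n - T * k).toNat) = r.toNat := by omega
          rw [this]
          rcases hrdisj with h | h
          · omega
          · exact h.1
      · have hr00 : r = 0 := by tauto
        exact Or.inl (by omega)
    -- both sides equal T
    have hB : minimumTimeToInitialState1_alt word k = T := by
      simp only [minimumTimeToInitialState1_alt, ← hldef, ← hndef]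
      rw [if_neg (by omega)]
      exact scanB_eq l k T hT1 hdone hmin (l.length + 1) 1 (le_refl _) hT1 (by omega)
    have hA : minimumTimeToInitialState1 word k = T := by
      simp only [minimumTimeToInitialState1, ← hldef, ← hndef, ← hstdef, ← hrdef, ← hTdef]
    rw [hA, hB]

-- ===== VERDICT (by name: the statement is the Claim_ definition above) =====
theorem minimumTimeToInitialState1_spec : Claim_equal_minimumTimeToInitialState1 := by
  intro word k _ hk
  unfold Spec_minimumTimeToInitialState1
  exact main_eq word k hk
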